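-- pv_equiv track=rewrite | github.com/scottwedge/sudoku | sudoku.py | create_list_of_internal_grids
-- ===== SOURCE A (Python) =====
-- def create_list_of_internal_grids(part_side):  # Create list of internal grid lists for any N x N grid
--     list_of_internal_grids = []
--     for s in range(part_side):  # Move down vertically between top left spot in column of left-most internal grids
--                                # So in a 9x9 grid (spots 0-80) move between spots 0, 27 and 54
--         for n in range(part_side):   # move to next grid to the right
--             internal_grid = []    # Initialize new list
--             for v in range(part_side):  # Move vertically within internal grid
--                 for h in range(part_side):  # Move horizontally within internal grid
--                     spot = v * part_side ** 2 + h
--                     spot = spot + n * part_side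
--                     spot = spot + s * part_side ** 3
--                     internal_grid.append(spot)
--             list_of_internal_grids.append(internal_grid)
--     return list_of_internal_grids
-- ===== SOURCE B (Python) =====
-- def create_list_of_internal_grids(part_side):  # single pass over board cells, bucketed by block index
--     if part_side <= 0:
--         return []  # no blocks for a non-positive partition size
--     side = part_side * part_side
--     grids = [[] for _ in range(side)]
--     for cell in range(side * side):
--         row, col = divmod(cell, side)
--         grids[(row // part_side) * part_side + col // part_side].append(cell)
--     return grids
-- ===== Notes on version B (the rewrite author's own statement) =====
-- stated objective: alternative
-- what changed: Instead of generating each block's spot list with four nested loops, B makes one pass over all board cells 0..side^2-1 and buckets each cell into its block's list computed by divmod arithmetic.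
import Mathlib
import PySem

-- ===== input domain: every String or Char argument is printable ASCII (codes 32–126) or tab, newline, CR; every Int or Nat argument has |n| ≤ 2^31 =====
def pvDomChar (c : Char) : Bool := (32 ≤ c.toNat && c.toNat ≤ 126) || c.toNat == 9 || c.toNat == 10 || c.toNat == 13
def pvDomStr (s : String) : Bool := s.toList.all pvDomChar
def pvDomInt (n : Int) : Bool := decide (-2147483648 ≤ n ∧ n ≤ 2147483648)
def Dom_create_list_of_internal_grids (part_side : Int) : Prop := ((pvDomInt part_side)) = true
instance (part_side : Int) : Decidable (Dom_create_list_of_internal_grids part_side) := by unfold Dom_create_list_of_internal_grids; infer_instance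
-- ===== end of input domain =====

-- B replaces A's block-by-block generation (four nested loops) by a single pass over all
-- board cells that buckets each cell into its block's list (alternative algorithm, same cost).

-- ===== PORT A =====
def create_list_of_internal_grids (part_side : Int) : List (List Int) :=
  (PySem.List.pyRange 0 part_side 1).foldl (fun lst s =>
    (PySem.List.pyRange 0 part_side 1).foldl (fun lst n =>
      let internal_grid :=
        (PySem.List.pyRange 0 part_side 1).foldl (fun g v =>
          (PySem.List.pyRange 0 part_side 1).foldl (fun g h =>
            let spot := v * part_side ^ 2 + h
            let spot := spot + n * part_side
            let spot := spot + s * part_side ^ 3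
            g ++ [spot]) g) []
      lst ++ [internal_grid]) lst) []

-- ===== PORT B =====
-- grids[idx].append(cell) is ported as read-then-set (pyGetD / pySetD): exact, since for
-- part_side > 0 the computed idx is always a valid non-negative index of grids.
def create_list_of_internal_grids_alt (part_side : Int) : List (List Int) :=
  if part_side ≤ 0 then []
  else
  let side := part_side * part_side
  let grids := (PySem.List.pyRange 0 side 1).map (fun _ => ([] : List Int))
  (PySem.List.pyRange 0 (side * side) 1).foldl (fun grids cell =>
    let row := PySem.Int.floordiv cell side
    let col := PySem.Int.mod cell side
    let idx := PySem.Int.floordiv row part_side * part_side + PySem.Int.floordiv col part_side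
    PySem.List.pySetD grids idx (PySem.List.pyGetD grids idx [] ++ [cell])) grids

-- ===== PRECONDITION & SPEC =====
def Spec_create_list_of_internal_grids (part_side : Int) (out : List (List Int)) : Prop := out = create_list_of_internal_grids_alt part_side
instance (part_side : Int) (out : List (List Int)) : Decidable (Spec_create_list_of_internal_grids part_side out) := by unfold Spec_create_list_of_internal_grids; infer_instance

-- ===== CLAIM (what is proved, stated in full; the proofs are below) =====
def Claim_equal_create_list_of_internal_grids : Prop := ∀ (part_side : Int), Dom_create_list_of_internal_grids part_side → Spec_create_list_of_internal_grids part_side (create_list_of_internal_grids part_side)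

-- ===== LEMMAS AND PROOFS =====

-- the block of spots A builds for outer indices (s, nn)
def pvBlock (p s nn : Int) : List Int :=
  (PySem.List.pyRange 0 p 1).flatMap (fun v =>
    (PySem.List.pyRange 0 p 1).map (fun h => s * p ^ 3 + nn * p + (v * p ^ 2 + h)))

-- the block index B assigns to a cell
def pvIdx (p x : Int) : Int :=
  PySem.Int.floordiv (PySem.Int.floordiv x (p * p)) p * p +
    PySem.Int.floordiv (PySem.Int.mod x (p * p)) p

-- A's inner two loops build exactly pvBlock
theorem pvA_inner (p s n : Int) :
    (PySem.List.pyRange 0 p 1).foldl (fun g v =>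
      (PySem.List.pyRange 0 p 1).foldl (fun g h =>
        g ++ [v * p ^ 2 + h + n * p + s * p ^ 3]) g) []
    = pvBlock p s n := by
  rw [show (fun (g : List Int) (v : Int) =>
      (PySem.List.pyRange 0 p 1).foldl (fun g h =>
        g ++ [v * p ^ 2 + h + n * p + s * p ^ 3]) g)
    = (fun g v => g ++ (PySem.List.pyRange 0 p 1).map
        (fun h => v * p ^ 2 + h + n * p + s * p ^ 3)) from
    funext fun g => funext fun v => PySem.List.foldl_append_singleton_eq_map _ _ _]
  rw [PySem.List.foldl_append_eq_flatMap, List.nil_append]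
  unfold pvBlock
  congr 1; funext v; congr 1; funext h; ring

-- A's value is the flatMap-of-blocks normal form
theorem pvA_eq (p : Int) :
    create_list_of_internal_grids p
    = (PySem.List.pyRange 0 p 1).flatMap (fun s =>
        (PySem.List.pyRange 0 p 1).map (fun nn => pvBlock p s nn)) := by
  unfold create_list_of_internal_grids
  rw [show (fun (lst : List (List Int)) (s : Int) =>
      (PySem.List.pyRange 0 p 1).foldl (fun lst n =>
        lst ++ [(PySem.List.pyRange 0 p 1).foldl (fun g v =>
          (PySem.List.pyRange 0 p 1).foldl (fun g h =>
            g ++ [v * p ^ 2 + h + n * p + s * p ^ 3]) g) []]) lst)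
    = (fun lst s => lst ++ (PySem.List.pyRange 0 p 1).map (fun n => pvBlock p s n)) from
    funext fun lst => funext fun s => by
      rw [show (fun (lst : List (List Int)) (n : Int) =>
          lst ++ [(PySem.List.pyRange 0 p 1).foldl (fun g v =>
            (PySem.List.pyRange 0 p 1).foldl (fun g h =>
              g ++ [v * p ^ 2 + h + n * p + s * p ^ 3]) g) []])
        = (fun lst n => lst ++ [pvBlock p s n]) from
        funext fun lst => funext fun n => by rw [pvA_inner]]
      exact PySem.List.foldl_append_singleton_eq_map _ _ _]
  rw [PySem.List.foldl_append_eq_flatMap, List.nil_append]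

-- a double loop over ranges a, b is a single loop over range a*b with divmod
theorem pvFlat2 {α : Type} (a b : Int) (ha : 0 ≤ a) (hb : 0 < b) (F : Int → Int → α) :
    (PySem.List.pyRange 0 a 1).flatMap (fun s => (PySem.List.pyRange 0 b 1).map (fun nn => F s nn))
    = (PySem.List.pyRange 0 (a * b) 1).map
        (fun t => F (PySem.Int.floordiv t b) (PySem.Int.mod t b)) := by
  obtain ⟨k, rfl⟩ : ∃ k : Nat, a = (k : Int) := ⟨a.toNat, (Int.toNat_of_nonneg ha).symm⟩
  clear ha
  induction k with
  | zero => simp [PySem.List.pyRange_one_eq_nil]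
  | succ k ih =>
    have hk : ((k + 1 : Nat) : Int) = (k : Int) + 1 := by push_cast; ring
    rw [hk, PySem.List.pyRange_one_succ_right (by positivity), List.flatMap_append, ih,
        show ((k : Int) + 1) * b = (k : Int) * b + b from by ring,
        PySem.List.pyRange_one_append 0 ((k : Int) * b) ((k : Int) * b + b)
          (by positivity) (by linarith), List.map_append]
    congr 1
    rw [List.flatMap_singleton, PySem.List.pyRange_one 0 b,
        PySem.List.pyRange_one ((k : Int) * b) ((k : Int) * b + b),
        show ((k : Int) * b + b - (k : Int) * b).toNat = (b - 0).toNat from by ring_nf,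
        List.map_map, List.map_map]
    refine List.map_congr_left fun j hj => ?_
    have hjb : (j : Int) < b := by
      have := List.mem_range.mp hj; omega
    have hdiv : PySem.Int.floordiv ((k : Int) * b + (j : Int)) b = (k : Int) := by
      rw [PySem.Int.floordiv_eq_iff_of_pos hb]
      constructor
      · simp
      · nlinarith
    have hmod : PySem.Int.mod ((k : Int) * b + (j : Int)) b = (j : Int) := by
      have := PySem.Int.floordiv_mul_add_mod ((k : Int) * b + (j : Int)) b
      rw [hdiv] at this; linarith
    simp [hdiv, hmod]

-- bucketing fold = per-bucket filter
theorem pvBucket (f : Int → Int) (L : List Int) (init : List (List Int))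
    (hf : ∀ x ∈ L, 0 ≤ f x ∧ (f x).toNat < init.length) :
    L.foldl (fun g x => PySem.List.pySetD g (f x) (PySem.List.pyGetD g (f x) [] ++ [x])) init
    = init.mapIdx (fun b l => l ++ L.filter (fun x => f x == (b : Int))) := by
  induction L generalizing init with
  | nil =>
    simp only [List.foldl_nil, List.filter_nil, List.append_nil]
    exact List.ext_getElem (by simp) (fun i h1 h2 => by simp [List.getElem_mapIdx])
  | cons x L ih =>
    obtain ⟨hx0, hxlt⟩ := hf x (List.mem_cons_self)
    simp only [List.foldl_cons]
    rw [PySem.List.pySetD_of_nonneg _ _ hx0, PySem.List.pyGetD_of_nonneg _ _ hx0,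
        ih _ (fun y hy => by
          have := hf y (List.mem_cons_of_mem _ hy)
          simpa using this)]
    apply List.ext_getElem (by simp)
    intro b h1 h2
    simp only [List.getElem_mapIdx, List.filter_cons]
    by_cases hbj : b = (f x).toNat
    · subst hbj
      have hfb : ((f x == ((f x).toNat : Int))) = true := by
        simp [Int.toNat_of_nonneg hx0]
      rw [List.getElem_set_self, List.getD_eq_getElem _ _ hxlt, hfb]
      simp
    · have hne : (f x == ((b : Nat) : Int)) = false := by
        simp only [beq_eq_false_iff_ne, ne_eq]
        intro heq
        exact hbj (by omega)
      rw [List.getElem_set_ne (by omega), hne]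
      simp

-- divmod characterization of the cells of a block, on the Nat side
theorem pvNatChar (m a c y : Nat) (hm : 0 < m) (ha : a < m) (hc : c < m) :
    (y < m*m*(m*m) ∧ (y/(m*m)/m)*m + (y%(m*m))/m = a*m + c)
    ↔ ∃ v, v < m ∧ ∃ h, h < m ∧ y = a*(m*m*m) + c*m + (v*(m*m) + h) := by
  have hmm : 0 < m*m := Nat.mul_pos hm hm
  constructor
  · rintro ⟨hy, e⟩
    set q := y/(m*m) with hq
    set rem := y%(m*m) with hrem
    have hremlt : rem < m*m := Nat.mod_lt _ hmm
    have hrm : rem/m < m := (Nat.div_lt_iff_lt_mul hm).mpr hremlt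
    have hqa : q/m = a := by
      have e2 := congrArg (·/m) e
      simp only at e2
      rw [Nat.mul_comm (q/m) m, Nat.mul_add_div hm, Nat.div_eq_of_lt hrm,
          Nat.mul_comm a m, Nat.mul_add_div hm, Nat.div_eq_of_lt hc] at e2
      omega
    have hrc : rem/m = c := by rw [hqa] at e; omega
    refine ⟨q % m, Nat.mod_lt _ hm, rem % m, Nat.mod_lt _ hm, ?_⟩
    have h1 : m*m*q + rem = y := Nat.div_add_mod y (m*m)
    have h2 : m*a + q%m = q := by have := Nat.div_add_mod q m; rw [hqa] at this; exact this
    have h3 : m*c + rem%m = rem := by have := Nat.div_add_mod rem m; rw [hrc] at this; exact this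
    calc y = m*m*q + rem := h1.symm
      _ = m*m*(m*a + q%m) + (m*c + rem%m) := by rw [h2, h3]
      _ = a*(m*m*m) + c*m + ((q%m)*(m*m) + rem%m) := by ring
  · rintro ⟨v, hv, h, hh, rfl⟩
    have hkey : a*(m*m*m) + c*m + (v*(m*m) + h) = (m*m)*(a*m+v) + (c*m+h) := by ring
    have hcm : c*m + m ≤ m*m := by
      calc c*m + m = (c+1)*m := by ring
        _ ≤ m*m := Nat.mul_le_mul_right m hc
    have ham : a*m + m ≤ m*m := by
      calc a*m + m = (a+1)*m := by ring
        _ ≤ m*m := Nat.mul_le_mul_right m ha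
    have hcmh : c*m + h < m*m := by omega
    have hQ : a*m + v + 1 ≤ m*m := by omega
    have h4 : (a*m+v)/m = a := by
      rw [Nat.mul_comm a m, Nat.mul_add_div hm, Nat.div_eq_of_lt hv]; omega
    have h5 : (c*m+h)/m = c := by
      rw [Nat.mul_comm c m, Nat.mul_add_div hm, Nat.div_eq_of_lt hh]; omega
    constructor
    · rw [hkey]
      have h6 : (m*m)*(a*m+v+1) = (m*m)*(a*m+v) + m*m := by ring
      have h7 : (m*m)*(a*m+v+1) ≤ (m*m)*(m*m) := Nat.mul_le_mul_left (m*m) hQ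
      have h8 : m*m*(m*m) = (m*m)*(m*m) := rfl
      omega
    · rw [hkey, Nat.mul_add_div hmm, Nat.div_eq_of_lt hcmh, Nat.mul_add_mod,
          Nat.mod_eq_of_lt hcmh, Nat.add_zero, h4, h5]

theorem pvIdx_natCast (m y : Nat) :
    pvIdx (m : Int) (y : Int) = (((y/(m*m)/m)*m + (y%(m*m))/m : Nat) : Int) := by
  unfold pvIdx
  rw [show ((m : Int) * m) = ((m*m : Nat) : Int) from by push_cast; ring,
      PySem.Int.floordiv_natCast, PySem.Int.mod_natCast,
      PySem.Int.floordiv_natCast, PySem.Int.floordiv_natCast]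
  push_cast; ring

-- membership: a cell is kept by block (a, c)'s filter iff it is a spot of pvBlock
theorem pvMem (m a c : Nat) (hm : 0 < m) (ha : a < m) (hc : c < m) (x : Int) :
    (x ∈ (PySem.List.pyRange 0 ((m:Int) * m * ((m:Int) * m)) 1).filter
        (fun x => pvIdx (m:Int) x == (a:Int) * m + c))
    ↔ x ∈ pvBlock (m:Int) (a:Int) (c:Int) := by
  rw [List.mem_filter, PySem.List.mem_pyRange_one]
  simp only [pvBlock, List.mem_flatMap, List.mem_map, PySem.List.mem_pyRange_one, beq_iff_eq]
  constructor
  · rintro ⟨⟨hx0, hxlt⟩, e⟩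
    obtain ⟨y, rfl⟩ : ∃ y : Nat, x = (y : Int) := ⟨x.toNat, (Int.toNat_of_nonneg hx0).symm⟩
    rw [pvIdx_natCast] at e
    have e' : (y/(m*m)/m)*m + (y%(m*m))/m = a*m + c := by exact_mod_cast e
    have hy : y < m*m*(m*m) := by exact_mod_cast hxlt
    obtain ⟨v, hv, h, hh, rfl⟩ := (pvNatChar m a c y hm ha hc).mp ⟨hy, e'⟩
    refine ⟨(v : Int), ⟨by positivity, by exact_mod_cast hv⟩,
            (h : Int), ⟨by positivity, by exact_mod_cast hh⟩, ?_⟩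
    push_cast; ring
  · rintro ⟨v, ⟨hv0, hv⟩, h, ⟨hh0, hh⟩, rfl⟩
    obtain ⟨vn, rfl⟩ : ∃ k : Nat, v = (k : Int) := ⟨v.toNat, (Int.toNat_of_nonneg hv0).symm⟩
    obtain ⟨hn, rfl⟩ : ∃ k : Nat, h = (k : Int) := ⟨h.toNat, (Int.toNat_of_nonneg hh0).symm⟩
    have hvn : vn < m := by exact_mod_cast hv
    have hhn : hn < m := by exact_mod_cast hh
    obtain ⟨hy, e'⟩ := (pvNatChar m a c (a*(m*m*m) + c*m + (vn*(m*m) + hn)) hm ha hc).mpr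
      ⟨vn, hvn, hn, hhn, rfl⟩
    have hxe : (a:Int) * m ^ 3 + c * m + ((vn:Int) * m ^ 2 + hn)
        = ((a*(m*m*m) + c*m + (vn*(m*m) + hn) : Nat) : Int) := by push_cast; ring
    refine ⟨⟨by rw [hxe]; positivity, by rw [hxe]; exact_mod_cast hy⟩, ?_⟩
    rw [hxe, pvIdx_natCast, e']; push_cast; ring

-- the cells of block (s, nn), in cell order, are exactly pvBlock (both strictly increasing)
theorem pvFilter_block (p s nn : Int) (hp : 0 < p) (hs : 0 ≤ s) (hs' : s < p)
    (hn : 0 ≤ nn) (hn' : nn < p) :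
    (PySem.List.pyRange 0 (p * p * (p * p)) 1).filter (fun x => pvIdx p x == s * p + nn)
    = pvBlock p s nn := by
  obtain ⟨m, rfl⟩ : ∃ k : Nat, p = (k : Int) := ⟨p.toNat, (Int.toNat_of_nonneg hp.le).symm⟩
  obtain ⟨a, rfl⟩ : ∃ k : Nat, s = (k : Int) := ⟨s.toNat, (Int.toNat_of_nonneg hs).symm⟩
  obtain ⟨c, rfl⟩ : ∃ k : Nat, nn = (k : Int) := ⟨nn.toNat, (Int.toNat_of_nonneg hn).symm⟩
  have hm : 0 < m := by exact_mod_cast hp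
  have ha : a < m := by exact_mod_cast hs'
  have hc : c < m := by exact_mod_cast hn'
  have hA : ((PySem.List.pyRange 0 ((m:Int) * m * ((m:Int) * m)) 1).filter
      (fun x => pvIdx (m:Int) x == (a:Int) * m + c)).Pairwise (· < ·) :=
    (PySem.List.pairwise_lt_pyRange_one _ _).filter _
  have hB : (pvBlock (m:Int) (a:Int) (c:Int)).Pairwise (· < ·) := by
    unfold pvBlock
    rw [List.pairwise_flatMap]
    constructor
    · intro v _
      rw [List.pairwise_map]
      exact (PySem.List.pairwise_lt_pyRange_one _ _).imp (fun hlt => by omega)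
    · refine (PySem.List.pairwise_lt_pyRange_one 0 (m:Int)).imp ?_
      intro v v' hvv' x hx y hy
      simp only [List.mem_map, PySem.List.mem_pyRange_one] at hx hy
      obtain ⟨h, ⟨hh0, hhm⟩, rfl⟩ := hx
      obtain ⟨h', ⟨hh0', _⟩, rfl⟩ := hy
      have h1 : (m:Int) ≤ (m:Int) ^ 2 := by nlinarith [hp]
      have h2 : (v + 1) * (m:Int) ^ 2 ≤ v' * (m:Int) ^ 2 :=
        mul_le_mul_of_nonneg_right (by omega) (by positivity)
      nlinarith
  have ndA := hA.imp (fun hlt => ne_of_lt hlt)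
  have ndB := hB.imp (fun hlt => ne_of_lt hlt)
  have hperm : (pvBlock (m:Int) (a:Int) (c:Int)).Perm
      ((PySem.List.pyRange 0 ((m:Int) * m * ((m:Int) * m)) 1).filter
        (fun x => pvIdx (m:Int) x == (a:Int) * m + c)) :=
    (List.perm_ext_iff_of_nodup ndB ndA).mpr (fun z => (pvMem m a c hm ha hc z).symm)
  have e1 := PySem.List.sorted_eq_of_perm_of_pairwise_lt
    ((PySem.List.pyRange 0 ((m:Int) * m * ((m:Int) * m)) 1).filter
      (fun x => pvIdx (m:Int) x == (a:Int) * m + c))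
    ((PySem.List.pyRange 0 ((m:Int) * m * ((m:Int) * m)) 1).filter
      (fun x => pvIdx (m:Int) x == (a:Int) * m + c)) (fun x => x) (List.Perm.refl _) hA
  have e2 := PySem.List.sorted_eq_of_perm_of_pairwise_lt
    ((PySem.List.pyRange 0 ((m:Int) * m * ((m:Int) * m)) 1).filter
      (fun x => pvIdx (m:Int) x == (a:Int) * m + c))
    (pvBlock (m:Int) (a:Int) (c:Int)) (fun x => x) hperm hB
  rw [← e1, e2]

-- B in closed form: fold shape of pvBucket (lets of the port zeta-reduce away)
theorem pvB_def (p : Int) (hp : 0 < p) : create_list_of_internal_grids_alt p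
    = (PySem.List.pyRange 0 (p * p * (p * p)) 1).foldl
        (fun g x => PySem.List.pySetD g (pvIdx p x) (PySem.List.pyGetD g (pvIdx p x) [] ++ [x]))
        ((PySem.List.pyRange 0 (p * p) 1).map (fun _ => ([] : List Int))) := by
  unfold create_list_of_internal_grids_alt
  rw [if_neg (by omega)]
  rfl

-- ===== VERDICT (by name: the statement is the Claim_ definition above) =====
theorem create_list_of_internal_grids_spec : Claim_equal_create_list_of_internal_grids := by
  intro p _
  show create_list_of_internal_grids p = create_list_of_internal_grids_alt p
  by_cases hp : p ≤ 0
  · rw [pvA_eq, PySem.List.pyRange_one_eq_nil hp]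
    unfold create_list_of_internal_grids_alt
    rw [if_pos hp]
    rfl
  · replace hp : 0 < p := by omega
    obtain ⟨m, rfl⟩ : ∃ k : Nat, p = (k : Int) := ⟨p.toNat, (Int.toNat_of_nonneg hp.le).symm⟩
    have hm : 0 < m := by exact_mod_cast hp
    rw [pvA_eq, pvFlat2 _ _ hp.le hp, pvB_def _ hp, pvBucket (pvIdx (m:Int)) _ _ ?hf]
    case hf =>
      intro x hx
      rw [PySem.List.mem_pyRange_one] at hx
      obtain ⟨y, rfl⟩ : ∃ k : Nat, x = (k : Int) := ⟨x.toNat, (Int.toNat_of_nonneg hx.1).symm⟩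
      have hy : y < m*m*(m*m) := by exact_mod_cast hx.2
      rw [pvIdx_natCast]
      have hq : y/(m*m)/m < m := by
        have h1 : y/(m*m) < m*m := (Nat.div_lt_iff_lt_mul (Nat.mul_pos hm hm)).mpr hy
        exact (Nat.div_lt_iff_lt_mul hm).mpr h1
      have hr : (y%(m*m))/m < m :=
        (Nat.div_lt_iff_lt_mul hm).mpr (Nat.mod_lt _ (Nat.mul_pos hm hm))
      have hidx : (y/(m*m)/m)*m + (y%(m*m))/m < m*m := by
        have h1 : (y/(m*m)/m + 1)*m ≤ m*m := Nat.mul_le_mul_right m hq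
        have h2 : (y/(m*m)/m + 1)*m = (y/(m*m)/m)*m + m := by ring
        omega
      constructor
      · positivity
      · simp only [Int.toNat_natCast, List.length_map, PySem.List.length_pyRange_one]
        omega
    apply List.ext_getElem
    · simp [PySem.List.length_pyRange_one]
    · intro k h1 h2
      simp only [List.getElem_map, List.getElem_mapIdx, PySem.List.getElem_pyRange_one,
        zero_add, List.nil_append]
      have hk : k < ((m:Int)*m - 0).toNat := by
        simpa [PySem.List.length_pyRange_one] using h1
      have hkm : k < m*m := by
        have : ((m:Int)*m - 0).toNat = m*m := by omega
        omega
      have hsplit : PySem.Int.floordiv (k:Int) (m:Int) * (m:Int) + PySem.Int.mod (k:Int) (m:Int) = (k:Int) :=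
        PySem.Int.floordiv_mul_add_mod _ _
      have hfb := pvFilter_block (m:Int) (PySem.Int.floordiv (k:Int) (m:Int))
        (PySem.Int.mod (k:Int) (m:Int)) hp
        (by rw [PySem.Int.floordiv_natCast]; positivity)
        (by rw [PySem.Int.floordiv_natCast]
            have : k/m < m := (Nat.div_lt_iff_lt_mul hm).mpr hkm
            exact_mod_cast this)
        (PySem.Int.mod_nonneg _ hp)
        (PySem.Int.mod_lt _ hp)
      rw [hsplit] at hfb
      exact hfb.symm
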